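-- pv_equiv track=rewrite | github.com/martin3836/DSA_A2 | a1_partd.py | all_same_signs
-- ===== SOURCE A (Python) =====
-- def all_same_signs(grid):
--     """
--     Checks if all non-zero cells in the grid have the same sign.
--
--     Args:
--         grid (list of list of int): The 2D grid to check.
--
--     Returns:
--         bool: True if all non-zero cells have the same sign, False otherwise.
--     """
--     signs = set()
--     for row in grid:
--         for cell in row:
--             if cell != 0:
--                 signs.add(1 if cell > 0 else -1)
--             if len(signs) > 1:
--                 return False
--     return len(signs) <= 1
-- ===== SOURCE B (Python) =====
-- def all_same_signs(grid):
--     """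
--     Checks if all non-zero cells in the grid have the same sign.
--     """
--     has_positive = any(cell > 0 for row in grid for cell in row)
--     has_negative = any(cell < 0 for row in grid for cell in row)
--     return not (has_positive and has_negative)
-- ===== Notes on version B (the rewrite author's own statement) =====
-- stated objective: idiomatic
-- what changed: Replaces the sign-set accumulation with early return by two independent short-circuiting existence queries (has_positive, has_negative) combined as not(has_positive and has_negative).
import Mathlib
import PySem

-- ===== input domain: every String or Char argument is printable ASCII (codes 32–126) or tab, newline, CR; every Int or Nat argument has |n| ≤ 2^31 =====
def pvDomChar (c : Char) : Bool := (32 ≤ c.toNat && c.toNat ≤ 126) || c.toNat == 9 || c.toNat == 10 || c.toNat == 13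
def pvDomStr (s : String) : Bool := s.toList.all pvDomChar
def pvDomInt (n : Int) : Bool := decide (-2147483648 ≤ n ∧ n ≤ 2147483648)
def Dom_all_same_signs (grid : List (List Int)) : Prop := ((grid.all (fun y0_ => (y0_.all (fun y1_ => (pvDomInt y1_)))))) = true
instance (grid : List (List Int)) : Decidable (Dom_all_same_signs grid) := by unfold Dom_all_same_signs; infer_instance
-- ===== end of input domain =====

-- B replaces A's accumulated sign set with two independent existence checks (any positive, any negative): idiomatic, same cost.


-- ===== PORT A =====
-- inner loop over the cells of one row: adds the sign to the set, 'none' models the early 'return False'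
def pvACells (signs : List Int) : List Int → Option (List Int)
  | [] => some signs
  | c :: cs =>
    let s := if c ≠ 0 then PySem.Set.add signs (if 0 < c then (1 : Int) else -1) else signs
    if 1 < s.length then none else pvACells s cs

-- outer loop over the rows
def pvARows (signs : List Int) : List (List Int) → Option (List Int)
  | [] => some signs
  | r :: rs =>
    match pvACells signs r with
    | none => none
    | some s => pvARows s rs

def all_same_signs (grid : List (List Int)) : Bool :=
  match pvARows [] grid with
  | none => false
  | some s => decide (s.length ≤ 1)

-- ===== PORT B =====
def all_same_signs_alt (grid : List (List Int)) : Bool :=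
  let has_positive := grid.any (fun row => row.any (fun cell => decide (0 < cell)))
  let has_negative := grid.any (fun row => row.any (fun cell => decide (cell < 0)))
  !(has_positive && has_negative)

-- ===== PRECONDITION & SPEC =====
def Spec_all_same_signs (grid : List (List Int)) (out : Bool) : Prop := out = all_same_signs_alt grid
instance (grid : List (List Int)) (out : Bool) : Decidable (Spec_all_same_signs grid out) := by unfold Spec_all_same_signs; infer_instance

-- ===== CLAIM (what is proved, stated in full; the proofs are below) =====
def Claim_equal_all_same_signs : Prop := ∀ (grid : List (List Int)), Dom_all_same_signs grid → Spec_all_same_signs grid (all_same_signs grid)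

-- ===== LEMMAS AND PROOFS =====

-- abstract state: which signs are present so far
def pvState (p n : Prop) [Decidable p] [Decidable n] : List Int :=
  if p then [1] else if n then [-1] else []

-- step lemmas for the inner loop
theorem pvStep_zero (cs : List Int) (s : List Int) (hlen : s.length ≤ 1) :
    pvACells s (0 :: cs) = pvACells s cs := by
  simp [pvACells]; omega

theorem pvStep_pos_new (cs : List Int) (c : Int) (hc : 0 < c) :
    pvACells [] (c :: cs) = pvACells [1] cs := by
  simp [pvACells, PySem.Set.add, PySem.Set.contains, hc, (show ¬ c = 0 by omega)]

theorem pvStep_neg_new (cs : List Int) (c : Int) (hc : c < 0) :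
    pvACells [] (c :: cs) = pvACells [-1] cs := by
  simp [pvACells, PySem.Set.add, PySem.Set.contains, (show ¬ 0 < c by omega), (show ¬ c = 0 by omega)]

theorem pvStep_pos_old (cs : List Int) (c : Int) (hc : 0 < c) :
    pvACells [1] (c :: cs) = pvACells [1] cs := by
  simp [pvACells, PySem.Set.add, PySem.Set.contains, hc, (show ¬ c = 0 by omega)]

theorem pvStep_neg_old (cs : List Int) (c : Int) (hc : c < 0) :
    pvACells [-1] (c :: cs) = pvACells [-1] cs := by
  simp [pvACells, PySem.Set.add, PySem.Set.contains, (show ¬ 0 < c by omega), (show ¬ c = 0 by omega)]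

theorem pvStep_pos_clash (cs : List Int) (c : Int) (hc : 0 < c) :
    pvACells [-1] (c :: cs) = none := by
  simp [pvACells, PySem.Set.add, PySem.Set.contains, hc, (show ¬ c = 0 by omega)]

theorem pvStep_neg_clash (cs : List Int) (c : Int) (hc : c < 0) :
    pvACells [1] (c :: cs) = none := by
  simp [pvACells, PySem.Set.add, PySem.Set.contains, (show ¬ 0 < c by omega), (show ¬ c = 0 by omega)]

-- characterisation of the inner loop, started from any reachable abstract state
theorem pvACells_char (cs : List Int) (p n : Prop) [Decidable p] [Decidable n] (hpn : ¬ (p ∧ n)) :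
    pvACells (pvState p n) cs =
      (if (p ∨ ∃ c ∈ cs, 0 < c) ∧ (n ∨ ∃ c ∈ cs, c < 0) then none
       else some (pvState (p ∨ ∃ c ∈ cs, 0 < c) (n ∨ ∃ c ∈ cs, c < 0))) := by
  induction cs generalizing p n with
  | nil =>
    simp only [List.not_mem_nil, false_and, exists_false, or_false]
    rw [if_neg hpn]
    rfl
  | cons c cs ih =>
    rcases lt_trichotomy c 0 with hc | hc | hc
    · -- c < 0
      by_cases hp : p
      · rw [show pvState p n = [1] from by simp [pvState, hp],
            pvStep_neg_clash cs c hc, if_pos ⟨Or.inl hp, Or.inr ⟨c, by simp, hc⟩⟩]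
      · by_cases hn : n
        · rw [show pvState p n = [-1] from by simp [pvState, hp, hn],
              pvStep_neg_old cs c hc,
              show ([-1] : List Int) = pvState False True from rfl,
              ih False True (by simp)]
          simp [pvState, hp, hn, hc, show ¬ 0 < c from by omega]
        · rw [show pvState p n = [] from by simp [pvState, hp, hn],
              pvStep_neg_new cs c hc,
              show ([-1] : List Int) = pvState False True from rfl,
              ih False True (by simp)]
          simp [pvState, hp, hn, hc, show ¬ 0 < c from by omega]
    · -- c = 0
      subst hc
      rw [pvStep_zero cs (pvState p n) (by by_cases hp : p <;> by_cases hn : n <;> simp [pvState, hp, hn]),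
          ih p n hpn]
      simp
    · -- 0 < c
      by_cases hn : n
      · have hp : ¬ p := fun hp => hpn ⟨hp, hn⟩
        rw [show pvState p n = [-1] from by simp [pvState, hp, hn],
            pvStep_pos_clash cs c hc, if_pos ⟨Or.inr ⟨c, by simp, hc⟩, Or.inl hn⟩]
      · by_cases hp : p
        · rw [show pvState p n = [1] from by simp [pvState, hp],
              pvStep_pos_old cs c hc,
              show ([1] : List Int) = pvState True False from rfl,
              ih True False (by simp)]
          simp [pvState, hp, hn, hc, show ¬ c < 0 from by omega]
        · rw [show pvState p n = [] from by simp [pvState, hp, hn],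
              pvStep_pos_new cs c hc,
              show ([1] : List Int) = pvState True False from rfl,
              ih True False (by simp)]
          simp [pvState, hp, hn, hc, show ¬ c < 0 from by omega]

-- characterisation of the outer loop
set_option maxHeartbeats 1000000 in
theorem pvARows_char (rs : List (List Int)) (p n : Prop) [Decidable p] [Decidable n] (hpn : ¬ (p ∧ n)) :
    pvARows (pvState p n) rs =
      (if (p ∨ ∃ r ∈ rs, ∃ c ∈ r, 0 < c) ∧ (n ∨ ∃ r ∈ rs, ∃ c ∈ r, c < 0) then none
       else some (pvState (p ∨ ∃ r ∈ rs, ∃ c ∈ r, 0 < c) (n ∨ ∃ r ∈ rs, ∃ c ∈ r, c < 0))) := by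
  induction rs generalizing p n with
  | nil =>
    simp only [List.not_mem_nil, false_and, exists_false, or_false]
    rw [if_neg hpn]
    rfl
  | cons r rs ih =>
    rw [pvARows, pvACells_char r p n hpn]
    by_cases h : (p ∨ ∃ c ∈ r, 0 < c) ∧ (n ∨ ∃ c ∈ r, c < 0)
    · rw [if_pos h, if_pos ⟨h.1.imp id (fun ⟨c, hc, h⟩ => ⟨r, by simp, c, hc, h⟩),
                           h.2.imp id (fun ⟨c, hc, h⟩ => ⟨r, by simp, c, hc, h⟩)⟩]
    · rw [if_neg h]
      refine (ih (p ∨ ∃ c ∈ r, 0 < c) (n ∨ ∃ c ∈ r, c < 0) h).trans ?_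
      by_cases hp : p <;> by_cases hn : n <;>
        by_cases h1 : ∃ c ∈ r, 0 < c <;> by_cases h2 : ∃ c ∈ r, c < 0 <;>
        by_cases h3 : ∃ r' ∈ rs, ∃ c ∈ r', 0 < c <;> by_cases h4 : ∃ r' ∈ rs, ∃ c ∈ r', c < 0 <;>
        simp_all [pvState]
-- ===== VERDICT (by name: the statement is the Claim_ definition above) =====
theorem all_same_signs_spec : Claim_equal_all_same_signs := by
  intro grid _
  unfold Spec_all_same_signs all_same_signs all_same_signs_alt
  rw [show ([] : List Int) = pvState False False from rfl, pvARows_char grid False False (by simp)]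
  have e1 : (grid.any fun row => row.any fun cell => decide (0 < cell)) = true ↔
      ∃ r ∈ grid, ∃ c ∈ r, 0 < c := by simp [List.any_eq_true]
  have e2 : (grid.any fun row => row.any fun cell => decide (cell < 0)) = true ↔
      ∃ r ∈ grid, ∃ c ∈ r, c < 0 := by simp [List.any_eq_true]
  by_cases hP : ∃ r ∈ grid, ∃ c ∈ r, 0 < c <;> by_cases hN : ∃ r ∈ grid, ∃ c ∈ r, c < 0
  · rw [if_pos ⟨Or.inr hP, Or.inr hN⟩]
    simp [e1.mpr hP, e2.mpr hN]
  · have h2 : (grid.any fun row => row.any fun cell => decide (cell < 0)) = false := by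
      rw [← Bool.not_eq_true, e2]; exact hN
    rw [if_neg (fun h => hN (h.2.resolve_left False.elim))]
    simp [pvState, hP, h2]
  · have h1 : (grid.any fun row => row.any fun cell => decide (0 < cell)) = false := by
      rw [← Bool.not_eq_true, e1]; exact hP
    rw [if_neg (fun h => hP (h.1.resolve_left False.elim))]
    simp [pvState, hP, hN, h1]
  · have h1 : (grid.any fun row => row.any fun cell => decide (0 < cell)) = false := by
      rw [← Bool.not_eq_true, e1]; exact hP
    rw [if_neg (fun h => hP (h.1.resolve_left False.elim))]
    simp [pvState, hP, hN, h1]
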